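-- pv_equiv track=rewrite | github.com/the-omega-institute/automath | theory/2026_golden_ratio_driven_scan_projection_generation_recursive_emergence/scripts/exp_fold6_b3c3_seed.py | _orbit_size_hist
-- ===== SOURCE A (Python) =====
-- from typing import Dict, List, Sequence, Tuple
--
-- RootVec = Tuple[int, int, int]
--
-- def _signed_permutations_WB3() -> List[Tuple[Tuple[int, int, int], Tuple[int, int, int]]]:
--     """W(B3)=W(C3) as signed permutations of three coordinates (order 48)."""
--     perms = [
--         (0, 1, 2),
--         (0, 2, 1),
--         (1, 0, 2),
--         (1, 2, 0),
--         (2, 0, 1),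
--         (2, 1, 0),
--     ]
--     signs = [(a, b, c) for a in (-1, 1) for b in (-1, 1) for c in (-1, 1)]
--     return [(p, s) for p in perms for s in signs]
--
-- def _act_signed_perm(v: RootVec, p: Tuple[int, int, int], s: Tuple[int, int, int]) -> RootVec:
--     vv = (v[p[0]], v[p[1]], v[p[2]])
--     return (s[0] * vv[0], s[1] * vv[1], s[2] * vv[2])
--
-- def _orbit_size_hist(words: Sequence[str], mapping: Dict[str, RootVec]) -> Dict[int, int]:
--     inv = {rv: w for (w, rv) in mapping.items()}
--     W = _signed_permutations_WB3()
--     hist: Dict[int, int] = {}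
--     for w0 in words:
--         rv0 = mapping[w0]
--         orb: set[str] = set()
--         for (p, s) in W:
--             rv = _act_signed_perm(rv0, p=p, s=s)
--             if rv in inv:
--                 orb.add(inv[rv])
--         hist[len(orb)] = hist.get(len(orb), 0) + 1
--     return dict(sorted(hist.items()))
-- ===== SOURCE B (Python) =====
-- def _orbit_size_hist(words, mapping):
--     # Orbit invariant of W(B3): two root vectors lie in the same orbit iff the
--     # sorted absolute values of their coordinates agree.  So the orbit size of a
--     # present root vector is the number of distinct present vectors sharing that
--     # invariant: count keys once, then tally words by a lookup.
--     keys = [tuple(sorted(abs(x) for x in rv)) for rv in set(mapping.values())]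
--     kcount = {}
--     for k in keys:
--         kcount[k] = kcount.get(k, 0) + 1
--     hist = {}
--     for w0 in words:
--         n = kcount[tuple(sorted(abs(x) for x in mapping[w0]))]
--         hist[n] = hist.get(n, 0) + 1
--     return dict(sorted(hist.items()))
-- ===== Notes on version B (the rewrite author's own statement) =====
-- stated objective: faster
-- what changed: B replaces A's per-word scan of all 48 signed permutations (collecting preimage words in a set) by the W(B3) orbit invariant: the orbit of a root vector consists exactly of the vectors whose sorted absolute coordinate values agree, so B counts distinct present vectors per invariant key once and then tallies each word by a single dictionary lookup.
import Mathlib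
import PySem

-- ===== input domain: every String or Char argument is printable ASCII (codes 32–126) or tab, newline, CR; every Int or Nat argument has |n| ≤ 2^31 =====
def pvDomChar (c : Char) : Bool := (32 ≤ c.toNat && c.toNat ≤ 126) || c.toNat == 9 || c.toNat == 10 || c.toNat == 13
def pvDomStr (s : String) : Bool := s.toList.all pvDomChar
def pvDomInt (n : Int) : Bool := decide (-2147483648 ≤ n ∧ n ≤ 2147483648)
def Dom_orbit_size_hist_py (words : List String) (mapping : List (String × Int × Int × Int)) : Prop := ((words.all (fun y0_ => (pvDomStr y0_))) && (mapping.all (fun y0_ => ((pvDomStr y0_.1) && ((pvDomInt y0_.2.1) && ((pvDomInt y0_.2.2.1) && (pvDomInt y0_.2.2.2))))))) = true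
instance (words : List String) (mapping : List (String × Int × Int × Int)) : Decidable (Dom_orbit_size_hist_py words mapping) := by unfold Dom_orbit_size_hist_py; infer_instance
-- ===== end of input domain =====

-- B replaces A's per-word scan of the 48 signed permutations by the orbit invariant
-- (sorted absolute coordinate values): count present vectors per invariant key once,
-- then tally each word by one lookup (objective: faster by a constant factor).

-- ===== PORT A =====
-- tuple indexing v[i] for the concrete indices 0,1,2 used by _act_signed_perm
def pvGet3 (v : Int × Int × Int) (i : Nat) : Int :=
  match i with | 0 => v.1 | 1 => v.2.1 | _ => v.2.2

-- _signed_permutations_WB3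
def pvPerms : List (Nat × Nat × Nat) := [(0,1,2),(0,2,1),(1,0,2),(1,2,0),(2,0,1),(2,1,0)]
def pvSigns : List (Int × Int × Int) :=
  ([-1,1] : List Int).flatMap (fun a => ([-1,1] : List Int).flatMap (fun b => ([-1,1] : List Int).map (fun c => (a,b,c))))
def pvW : List ((Nat × Nat × Nat) × (Int × Int × Int)) :=
  pvPerms.flatMap (fun p => pvSigns.map (fun s => (p, s)))

-- _act_signed_perm
def pvActSignedPerm (v : Int × Int × Int) (p : Nat × Nat × Nat) (s : Int × Int × Int) : Int × Int × Int :=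
  let vv : Int × Int × Int := (pvGet3 v p.1, pvGet3 v p.2.1, pvGet3 v p.2.2)
  (s.1 * vv.1, s.2.1 * vv.2.1, s.2.2 * vv.2.2)

def orbit_size_hist_py (words : List String) (mapping : List (String × Int × Int × Int)) : List (Int × Int) :=
  -- inv = {rv: w for (w, rv) in mapping.items()}
  let inv : PySem.Dict (Int × Int × Int) String :=
    mapping.foldl (fun d wr => d.insert wr.2 wr.1) PySem.Dict.empty
  let hist : PySem.Dict Int Int :=
    words.foldl (fun hist w0 =>
      -- mapping[w0]; KeyError (w0 not a key) is excluded by Pre_, so getD's default is never read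
      let rv0 := ((PySem.Dict.mk mapping).get? w0).getD (0, 0, 0)
      let orb : PySem.Set String :=
        pvW.foldl (fun orb g =>
          let rv := pvActSignedPerm rv0 g.1 g.2
          if inv.contains rv then orb.add ((inv.get? rv).getD "") else orb) PySem.Set.empty
      hist.insert (PySem.Set.len orb) (hist.getD (PySem.Set.len orb) 0 + 1)) PySem.Dict.empty
  -- dict(sorted(hist.items())) — tuples compare lexicographically
  PySem.List.sorted2 hist.items (fun kv => kv.1) (fun kv => kv.2)

-- ===== PORT B =====
-- tuple(sorted(abs(x) for x in rv))
def pvKey (rv : Int × Int × Int) : List Int :=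
  PySem.List.sorted [|rv.1|, |rv.2.1|, |rv.2.2|] (fun x => x)

def orbit_size_hist_py_alt (words : List String) (mapping : List (String × Int × Int × Int)) : List (Int × Int) :=
  -- keys = [key(rv) for rv in set(mapping.values())]
  let keys : List (List Int) := (PySem.Set.ofList ((PySem.Dict.mk mapping).values)).map pvKey
  let kcount : PySem.Dict (List Int) Int :=
    keys.foldl (fun d k => d.insert k (d.getD k 0 + 1)) PySem.Dict.empty
  let hist : PySem.Dict Int Int :=
    words.foldl (fun hist w0 =>
      -- kcount[key(mapping[w0])]: both lookups always hit under Pre_, defaults never read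
      let n := kcount.getD (pvKey (((PySem.Dict.mk mapping).get? w0).getD (0, 0, 0))) 0
      hist.insert n (hist.getD n 0 + 1)) PySem.Dict.empty
  PySem.List.sorted2 hist.items (fun kv => kv.1) (fun kv => kv.2)

-- ===== PRECONDITION & SPEC =====
-- Pre_ excludes (a) words that are not keys of mapping (Python A raises KeyError there) and
-- (b) association lists with duplicate keys, which do not determine a Python dict
-- (first-vs-last binding is a representation accident).
def Pre_orbit_size_hist_py (words : List String) (mapping : List (String × Int × Int × Int)) : Prop :=
  (mapping.map (·.1)).Nodup ∧ ∀ w ∈ words, w ∈ mapping.map (·.1)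
instance (words : List String) (mapping : List (String × Int × Int × Int)) : Decidable (Pre_orbit_size_hist_py words mapping) := by unfold Pre_orbit_size_hist_py; infer_instance

def pvWitness_orbit_size_hist_py : List String × (List (String × Int × Int × Int)) :=
  (["x", "y", "x"], [("x", (1, 0, 0)), ("y", (1, 1, 0)), ("z", (0, -1, 0))])

def Spec_orbit_size_hist_py (words : List String) (mapping : List (String × Int × Int × Int)) (out : List (Int × Int)) : Prop := out = orbit_size_hist_py_alt words mapping
instance (words : List String) (mapping : List (String × Int × Int × Int)) (out : List (Int × Int)) : Decidable (Spec_orbit_size_hist_py words mapping out) := by unfold Spec_orbit_size_hist_py; infer_instance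

-- ===== CLAIM (what is proved, stated in full; the proofs are below) =====
def Claim_equal_orbit_size_hist_py : Prop := ∀ (words : List String) (mapping : List (String × Int × Int × Int)), Dom_orbit_size_hist_py words mapping → Pre_orbit_size_hist_py words mapping → Spec_orbit_size_hist_py words mapping (orbit_size_hist_py words mapping)

-- ===== LEMMAS AND PROOFS =====

-- sign helper: sg x * x = |x| and sg x * |x| = x
def pvSg (x : Int) : Int := if x < 0 then -1 else 1

theorem pvSg_pm (x : Int) : pvSg x = -1 ∨ pvSg x = 1 := by
  unfold pvSg; split <;> simp

theorem pvSg_mul (x : Int) : pvSg x * x = |x| := by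
  unfold pvSg; split <;> rename_i h
  · rw [abs_of_neg h]; ring
  · rw [abs_of_nonneg (by omega)]; ring

theorem pvSg_mul_abs (x : Int) : pvSg x * |x| = x := by
  unfold pvSg; split <;> rename_i h
  · rw [abs_of_neg h]; ring
  · rw [abs_of_nonneg (by omega)]; ring

theorem pvPm_abs_mul {a : Int} (x : Int) (ha : a = -1 ∨ a = 1) : |a * x| = |x| := by
  rcases ha with h | h <;> subst h <;> simp

theorem mem_pvSigns (s : Int × Int × Int) :
    s ∈ pvSigns ↔ (s.1 = -1 ∨ s.1 = 1) ∧ (s.2.1 = -1 ∨ s.2.1 = 1) ∧ (s.2.2 = -1 ∨ s.2.2 = 1) := by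
  obtain ⟨a, b, c⟩ := s
  constructor
  · intro h; fin_cases h <;> simp
  · rintro ⟨ha, hb, hc⟩
    rcases ha with h | h <;> subst h <;> rcases hb with h | h <;> subst h <;>
      rcases hc with h | h <;> subst h <;> decide

theorem mem_pvW (g : (Nat × Nat × Nat) × (Int × Int × Int)) :
    g ∈ pvW ↔ g.1 ∈ pvPerms ∧ g.2 ∈ pvSigns := by
  simp only [pvW, List.mem_flatMap, List.mem_map]
  constructor
  · rintro ⟨p, hp, s, hs, rfl⟩; exact ⟨hp, hs⟩
  · rintro ⟨hp, hs⟩; exact ⟨g.1, hp, g.2, hs, rfl⟩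

-- sorted of a 3-element list, named by its order
theorem sorted3_eq {x y z : Int} {l : List Int} (hperm : List.Perm [x, y, z] l)
    (hxy : x ≤ y) (hyz : y ≤ z) : PySem.List.sorted l (fun t => t) = [x, y, z] := by
  apply PySem.List.sorted_id_eq_of_perm_of_pairwise _ _ hperm
  simp [List.pairwise_cons, hxy, hyz, le_trans hxy hyz]

-- the six 3-element permutations used below
theorem perm3_021 {a b c : Int} : List.Perm [a, c, b] [a, b, c] := List.Perm.cons a (List.Perm.swap b c [])
theorem perm3_102 {a b c : Int} : List.Perm [b, a, c] [a, b, c] := List.Perm.swap a b [c]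
theorem perm3_120 {a b c : Int} : List.Perm [b, c, a] [a, b, c] :=
  List.Perm.trans (List.Perm.cons b (List.Perm.swap a c [])) (List.Perm.swap a b [c])
theorem perm3_201 {a b c : Int} : List.Perm [c, a, b] [a, b, c] :=
  List.Perm.trans (List.Perm.swap a c [b]) (List.Perm.cons a (List.Perm.swap b c []))
theorem perm3_210 {a b c : Int} : List.Perm [c, b, a] [a, b, c] :=
  List.Perm.trans (List.Perm.swap b c [a]) (List.Perm.trans (List.Perm.cons b (List.Perm.swap a c [])) (List.Perm.swap a b [c]))

-- the invariant key of every image of v under pvW is the key of v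
theorem pvKey_act (v : Int × Int × Int) (p : Nat × Nat × Nat) (s : Int × Int × Int)
    (hp : p ∈ pvPerms) (hs : s ∈ pvSigns) : pvKey (pvActSignedPerm v p s) = pvKey v := by
  rw [mem_pvSigns] at hs
  obtain ⟨ha, hb, hc⟩ := hs
  fin_cases hp <;>
    simp only [pvKey, pvActSignedPerm, pvGet3, PySem.List.sorted_id_eq_sorted_id_iff_perm,
      pvPm_abs_mul _ ha, pvPm_abs_mul _ hb, pvPm_abs_mul _ hc] <;>
    first
      | exact List.Perm.refl _
      | exact perm3_021 | exact perm3_102 | exact perm3_120 | exact perm3_201 | exact perm3_210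

-- index getter on a permutation triple, used only to state composition
def pvGet3N (p : Nat × Nat × Nat) (i : Nat) : Nat :=
  match i with | 0 => p.1 | 1 => p.2.1 | _ => p.2.2

-- composition: two actions compose to one action by a group element
theorem pvAct_comp (v : Int × Int × Int) (p : Nat × Nat × Nat) (s : Int × Int × Int)
    (p' : Nat × Nat × Nat) (s' : Int × Int × Int)
    (hp : p ∈ pvPerms) (hs : s ∈ pvSigns) (hp' : p' ∈ pvPerms) (hs' : s' ∈ pvSigns) :
    ∃ p'' s'', p'' ∈ pvPerms ∧ s'' ∈ pvSigns ∧
      pvActSignedPerm (pvActSignedPerm v p s) p' s' = pvActSignedPerm v p'' s'' := by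
  refine ⟨(pvGet3N p p'.1, pvGet3N p p'.2.1, pvGet3N p p'.2.2),
          (s'.1 * pvGet3 s p'.1, s'.2.1 * pvGet3 s p'.2.1, s'.2.2 * pvGet3 s p'.2.2),
          ?_, ?_, ?_⟩
  · fin_cases hp <;> fin_cases hp' <;> decide
  · obtain ⟨a, b, c⟩ := s; obtain ⟨a', b', c'⟩ := s'
    rw [mem_pvSigns] at hs hs'
    obtain ⟨ha, hb, hc⟩ := hs; obtain ⟨ha', hb', hc'⟩ := hs'
    rcases ha with h | h <;> subst h <;> rcases hb with h | h <;> subst h <;>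
      rcases hc with h | h <;> subst h <;> rcases ha' with h | h <;> subst h <;>
      rcases hb' with h | h <;> subst h <;> rcases hc' with h | h <;> subst h <;>
      fin_cases hp' <;> decide
  · fin_cases hp' <;> simp [pvActSignedPerm, pvGet3, pvGet3N, mul_assoc]

-- normal form: some group element sends v to its sorted-abs triple
theorem pvN1 (v : Int × Int × Int) :
    ∃ p s, p ∈ pvPerms ∧ s ∈ pvSigns ∧
      [(pvActSignedPerm v p s).1, (pvActSignedPerm v p s).2.1, (pvActSignedPerm v p s).2.2] = pvKey v := by
  obtain ⟨a, b, c⟩ := v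
  rcases le_total |a| |b| with hab | hab
  · rcases le_total |b| |c| with hbc | hbc
    · refine ⟨(0,1,2), (pvSg a, pvSg b, pvSg c), by decide,
        (mem_pvSigns _).mpr ⟨pvSg_pm a, pvSg_pm b, pvSg_pm c⟩, ?_⟩
      simp only [pvActSignedPerm, pvGet3, pvKey, pvSg_mul]
      exact (sorted3_eq (List.Perm.refl _) hab hbc).symm
    · rcases le_total |a| |c| with hac | hac
      · refine ⟨(0,2,1), (pvSg a, pvSg c, pvSg b), by decide,
          (mem_pvSigns _).mpr ⟨pvSg_pm a, pvSg_pm c, pvSg_pm b⟩, ?_⟩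
        simp only [pvActSignedPerm, pvGet3, pvKey, pvSg_mul]
        exact (sorted3_eq perm3_021 hac hbc).symm
      · refine ⟨(2,0,1), (pvSg c, pvSg a, pvSg b), by decide,
          (mem_pvSigns _).mpr ⟨pvSg_pm c, pvSg_pm a, pvSg_pm b⟩, ?_⟩
        simp only [pvActSignedPerm, pvGet3, pvKey, pvSg_mul]
        exact (sorted3_eq perm3_201 hac hab).symm
  · rcases le_total |a| |c| with hac | hac
    · refine ⟨(1,0,2), (pvSg b, pvSg a, pvSg c), by decide,
        (mem_pvSigns _).mpr ⟨pvSg_pm b, pvSg_pm a, pvSg_pm c⟩, ?_⟩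
      simp only [pvActSignedPerm, pvGet3, pvKey, pvSg_mul]
      exact (sorted3_eq perm3_102 hab hac).symm
    · rcases le_total |b| |c| with hbc | hbc
      · refine ⟨(1,2,0), (pvSg b, pvSg c, pvSg a), by decide,
          (mem_pvSigns _).mpr ⟨pvSg_pm b, pvSg_pm c, pvSg_pm a⟩, ?_⟩
        simp only [pvActSignedPerm, pvGet3, pvKey, pvSg_mul]
        exact (sorted3_eq perm3_120 hbc hac).symm
      · refine ⟨(2,1,0), (pvSg c, pvSg b, pvSg a), by decide,
          (mem_pvSigns _).mpr ⟨pvSg_pm c, pvSg_pm b, pvSg_pm a⟩, ?_⟩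
        simp only [pvActSignedPerm, pvGet3, pvKey, pvSg_mul]
        exact (sorted3_eq perm3_210 hbc hab).symm

-- every q is an image of its own sorted-abs triple
theorem pvN2 (q u : Int × Int × Int) (hu : [u.1, u.2.1, u.2.2] = pvKey q) :
    ∃ p s, p ∈ pvPerms ∧ s ∈ pvSigns ∧ pvActSignedPerm u p s = q := by
  obtain ⟨a, b, c⟩ := q
  obtain ⟨u1, u2, u3⟩ := u
  simp only [pvKey] at hu
  rcases le_total |a| |b| with hab | hab
  · rcases le_total |b| |c| with hbc | hbc
    · rw [sorted3_eq (List.Perm.refl _) hab hbc] at hu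
      simp only [List.cons.injEq, and_true] at hu
      obtain ⟨h1, h2, h3⟩ := hu; subst h1; subst h2; subst h3
      exact ⟨(0,1,2), (pvSg a, pvSg b, pvSg c), by decide,
        (mem_pvSigns _).mpr ⟨pvSg_pm a, pvSg_pm b, pvSg_pm c⟩,
        by simp only [pvActSignedPerm, pvGet3]; exact Prod.ext (pvSg_mul_abs a) (Prod.ext (pvSg_mul_abs b) (pvSg_mul_abs c))⟩
    · rcases le_total |a| |c| with hac | hac
      · rw [sorted3_eq perm3_021 hac hbc] at hu
        simp only [List.cons.injEq, and_true] at hu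
        obtain ⟨h1, h2, h3⟩ := hu; subst h1; subst h2; subst h3
        exact ⟨(0,2,1), (pvSg a, pvSg b, pvSg c), by decide,
          (mem_pvSigns _).mpr ⟨pvSg_pm a, pvSg_pm b, pvSg_pm c⟩,
          by simp only [pvActSignedPerm, pvGet3]; exact Prod.ext (pvSg_mul_abs a) (Prod.ext (pvSg_mul_abs b) (pvSg_mul_abs c))⟩
      · rw [sorted3_eq perm3_201 hac hab] at hu
        simp only [List.cons.injEq, and_true] at hu
        obtain ⟨h1, h2, h3⟩ := hu; subst h1; subst h2; subst h3
        exact ⟨(1,2,0), (pvSg a, pvSg b, pvSg c), by decide,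
          (mem_pvSigns _).mpr ⟨pvSg_pm a, pvSg_pm b, pvSg_pm c⟩,
          by simp only [pvActSignedPerm, pvGet3]; exact Prod.ext (pvSg_mul_abs a) (Prod.ext (pvSg_mul_abs b) (pvSg_mul_abs c))⟩
  · rcases le_total |a| |c| with hac | hac
    · rw [sorted3_eq perm3_102 hab hac] at hu
      simp only [List.cons.injEq, and_true] at hu
      obtain ⟨h1, h2, h3⟩ := hu; subst h1; subst h2; subst h3
      exact ⟨(1,0,2), (pvSg a, pvSg b, pvSg c), by decide,
        (mem_pvSigns _).mpr ⟨pvSg_pm a, pvSg_pm b, pvSg_pm c⟩,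
        by simp only [pvActSignedPerm, pvGet3]; exact Prod.ext (pvSg_mul_abs a) (Prod.ext (pvSg_mul_abs b) (pvSg_mul_abs c))⟩
    · rcases le_total |b| |c| with hbc | hbc
      · rw [sorted3_eq perm3_120 hbc hac] at hu
        simp only [List.cons.injEq, and_true] at hu
        obtain ⟨h1, h2, h3⟩ := hu; subst h1; subst h2; subst h3
        exact ⟨(2,0,1), (pvSg a, pvSg b, pvSg c), by decide,
          (mem_pvSigns _).mpr ⟨pvSg_pm a, pvSg_pm b, pvSg_pm c⟩,
          by simp only [pvActSignedPerm, pvGet3]; exact Prod.ext (pvSg_mul_abs a) (Prod.ext (pvSg_mul_abs b) (pvSg_mul_abs c))⟩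
      · rw [sorted3_eq perm3_210 hbc hab] at hu
        simp only [List.cons.injEq, and_true] at hu
        obtain ⟨h1, h2, h3⟩ := hu; subst h1; subst h2; subst h3
        exact ⟨(2,1,0), (pvSg a, pvSg b, pvSg c), by decide,
          (mem_pvSigns _).mpr ⟨pvSg_pm a, pvSg_pm b, pvSg_pm c⟩,
          by simp only [pvActSignedPerm, pvGet3]; exact Prod.ext (pvSg_mul_abs a) (Prod.ext (pvSg_mul_abs b) (pvSg_mul_abs c))⟩

-- the orbit characterisation: images of v under pvW = vectors with the same invariant key
theorem pvOrbit_char (v q : Int × Int × Int) :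
    q ∈ pvW.map (fun g => pvActSignedPerm v g.1 g.2) ↔ pvKey q = pvKey v := by
  constructor
  · intro h
    obtain ⟨g, hg, rfl⟩ := List.mem_map.mp h
    obtain ⟨hp, hs⟩ := (mem_pvW g).mp hg
    exact pvKey_act v g.1 g.2 hp hs
  · intro hk
    obtain ⟨p0, s0, hp0, hs0, h1⟩ := pvN1 v
    rw [← hk] at h1
    obtain ⟨p1, s1, hp1, hs1, h2⟩ := pvN2 q _ h1
    obtain ⟨p2, s2, hp2, hs2, h3⟩ := pvAct_comp v p0 s0 p1 s1 hp0 hs0 hp1 hs1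
    exact List.mem_map.mpr ⟨(p2, s2), (mem_pvW _).mpr ⟨hp2, hs2⟩, by rw [← h3, h2]⟩

-- lookup in the fold that builds inv: last binding wins
theorem pvInv_get? (l : List (String × Int × Int × Int)) (d : PySem.Dict (Int × Int × Int) String)
    (rv : Int × Int × Int) :
    (l.foldl (fun d wr => d.insert wr.2 wr.1) d).get? rv
      = match l.reverse.find? (fun wr => wr.2 == rv) with
        | some wr => some wr.1
        | none => d.get? rv := by
  induction l generalizing d with
  | nil => simp
  | cons x t ih =>
    simp only [List.foldl_cons, List.reverse_cons, List.find?_append, ih]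
    cases htf : t.reverse.find? (fun wr => wr.2 == rv) with
    | some wr => simp
    | none =>
      simp only [Option.none_or, List.find?_cons, List.find?_nil]
      rw [PySem.Dict.get?_insert]
      by_cases h : rv = x.2
      · subst h; simp
      · have hb : (x.2 == rv) = false := by
          rw [beq_eq_false_iff_ne]; exact fun hh => h hh.symm
        rw [hb]; simp [h]

theorem pvInv_mem (l : List (String × Int × Int × Int)) (rv : Int × Int × Int) (w : String)
    (h : (l.foldl (fun d wr => d.insert wr.2 wr.1) PySem.Dict.empty).get? rv = some w) :
    (w, rv) ∈ l := by
  rw [pvInv_get?] at h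
  cases htf : l.reverse.find? (fun wr => wr.2 == rv) with
  | none => rw [htf] at h; simp [PySem.Dict.get?_empty] at h
  | some wr =>
    rw [htf] at h
    have hmem := List.mem_of_find?_eq_some htf
    have hpred := List.find?_some htf
    simp only [beq_iff_eq] at hpred
    simp only [Option.some.injEq] at h
    rw [List.mem_reverse] at hmem
    have : wr = (w, rv) := by
      obtain ⟨w', rv'⟩ := wr; simp_all
    rwa [this] at hmem

theorem pvInv_contains (l : List (String × Int × Int × Int)) (rv : Int × Int × Int) :
    (l.foldl (fun d wr => d.insert wr.2 wr.1) PySem.Dict.empty).contains rv = true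
      ↔ rv ∈ l.map (·.2) := by
  rw [PySem.Dict.contains_eq_isSome_get?, pvInv_get?]
  cases htf : l.reverse.find? (fun wr => wr.2 == rv) with
  | some wr =>
    simp only [Option.isSome_some, true_iff]
    have hmem := List.mem_of_find?_eq_some htf
    have hpred := List.find?_some htf
    simp only [beq_iff_eq] at hpred
    rw [List.mem_reverse] at hmem
    exact List.mem_map.mpr ⟨wr, hmem, hpred⟩
  | none =>
    simp only [PySem.Dict.get?_empty, Option.isSome_none]
    constructor
    · intro h; cases h
    · intro h
      obtain ⟨wr, hwr, hrv⟩ := List.mem_map.mp h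
      have : l.reverse.find? (fun wr => wr.2 == rv) ≠ none := by
        rw [← Option.isSome_iff_ne_none, List.find?_isSome]
        exact ⟨wr, List.mem_reverse.mpr hwr, by simp [hrv]⟩
      exact absurd htf this

-- a conditional-accumulate loop over a set is Set.update with the filtered images
theorem pvFoldl_add_if {α β : Type} [BEq α] (l : List β) (pb : β → Bool) (f : β → α)
    (s : PySem.Set α) :
    l.foldl (fun s g => if pb g then PySem.Set.add s (f g) else s) s
      = PySem.Set.update s ((l.filter pb).map f) := by
  induction l generalizing s with
  | nil => simp [PySem.Set.update]
  | cons x t ih =>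
    by_cases h : pb x
    · simp only [List.foldl_cons, List.filter_cons, h, if_pos, List.map_cons,
        PySem.Set.update_cons, ih]
    · simp only [List.foldl_cons, List.filter_cons, h, ih]
      simp

-- set(map f l) = map f (set(l)) for f injective on l
theorem pvOfList_map {α β : Type} [BEq α] [LawfulBEq α] [BEq β] [LawfulBEq β]
    (l : List α) (f : α → β)
    (hinj : ∀ x ∈ l, ∀ y ∈ l, f x = f y → x = y) :
    PySem.Set.ofList (l.map f) = (PySem.Set.ofList l).map f := by
  induction l using List.reverseRecOn with
  | nil => rfl
  | append_singleton t x ih =>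
    have hinj' : ∀ a ∈ t, ∀ b ∈ t, f a = f b → a = b := fun a ha b hb =>
      hinj a (by simp [ha]) b (by simp [hb])
    rw [List.map_append, List.map_singleton, PySem.Set.ofList_append_singleton,
      PySem.Set.ofList_append_singleton, ih hinj', PySem.Set.add_eq_ite, PySem.Set.add_eq_ite]
    have hmem : f x ∈ (PySem.Set.ofList t).map f ↔ x ∈ PySem.Set.ofList t := by
      constructor
      · intro h
        obtain ⟨y, hy, hfy⟩ := List.mem_map.mp h
        have hyt : y ∈ t := (PySem.Set.mem_ofList _ _).mp hy
        have := hinj y (by simp [hyt]) x (by simp) hfy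
        rwa [← this]
      · intro h; exact List.mem_map.mpr ⟨x, h, rfl⟩
    by_cases h : x ∈ PySem.Set.ofList t
    · rw [if_pos (hmem.mpr h), if_pos h]
    · rw [if_neg (fun hh => h (hmem.mp hh)), if_neg h, List.map_append, List.map_singleton]

-- the per-word equality: the size A computes equals the count B looks up
theorem pvPerWord (mapping : List (String × Int × Int × Int))
    (hnd : (mapping.map (·.1)).Nodup) (rv0 : Int × Int × Int) :
    PySem.Set.len (pvW.foldl (fun orb g =>
        if (mapping.foldl (fun d wr => d.insert wr.2 wr.1) PySem.Dict.empty).contains (pvActSignedPerm rv0 g.1 g.2)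
        then PySem.Set.add orb (((mapping.foldl (fun d wr => d.insert wr.2 wr.1) PySem.Dict.empty).get? (pvActSignedPerm rv0 g.1 g.2)).getD "")
        else orb) PySem.Set.empty)
      = (((PySem.Set.ofList ((PySem.Dict.mk mapping).values)).map pvKey).foldl
          (fun d k => d.insert k (d.getD k 0 + 1)) PySem.Dict.empty).getD (pvKey rv0) 0 := by
  rw [PySem.Dict.getD_foldl_insert_add_one, PySem.Dict.getD_empty]
  rw [pvFoldl_add_if pvW
    (fun g => (mapping.foldl (fun d wr => d.insert wr.2 wr.1) PySem.Dict.empty).contains (pvActSignedPerm rv0 g.1 g.2))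
    (fun g => ((mapping.foldl (fun d wr => d.insert wr.2 wr.1) PySem.Dict.empty).get? (pvActSignedPerm rv0 g.1 g.2)).getD "")]
  rw [show (PySem.Set.empty : PySem.Set String) = [] from rfl, PySem.Set.update_nil_left]
  have hvals : (PySem.Dict.mk mapping).values = mapping.map (·.2) := rfl
  have hLM : (pvW.filter
        (fun g => (mapping.foldl (fun d wr => d.insert wr.2 wr.1) PySem.Dict.empty).contains (pvActSignedPerm rv0 g.1 g.2))).map
        (fun g => ((mapping.foldl (fun d wr => d.insert wr.2 wr.1) PySem.Dict.empty).get? (pvActSignedPerm rv0 g.1 g.2)).getD "")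
      = ((pvW.map (fun g => pvActSignedPerm rv0 g.1 g.2)).filter
          (fun rv => (mapping.foldl (fun d wr => d.insert wr.2 wr.1) PySem.Dict.empty).contains rv)).map
          (fun rv => ((mapping.foldl (fun d wr => d.insert wr.2 wr.1) PySem.Dict.empty).get? rv).getD "") := by
    rw [List.filter_map, List.map_map]; rfl
  rw [hLM, hvals]
  -- abbreviations for readability of the remaining steps
  set inv := mapping.foldl (fun d wr => d.insert wr.2 wr.1) PySem.Dict.empty with hinv
  set I := pvW.map (fun g => pvActSignedPerm rv0 g.1 g.2) with hI
  set M := I.filter (fun rv => inv.contains rv) with hM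
  -- the word-extractor is injective on M
  have hndk : (PySem.Dict.mk mapping).keys.Nodup := hnd
  have hinjOn : ∀ x ∈ M, ∀ y ∈ M, ((inv.get? x).getD "") = ((inv.get? y).getD "") → x = y := by
    intro x hx y hy hw
    have hcx : inv.contains x = true := by
      have := (List.mem_filter.mp (hM ▸ hx)).2; simpa using this
    have hcy : inv.contains y = true := by
      have := (List.mem_filter.mp (hM ▸ hy)).2; simpa using this
    rw [PySem.Dict.contains_eq_isSome_get?] at hcx hcy
    obtain ⟨wx, hwx⟩ := Option.isSome_iff_exists.mp hcx
    obtain ⟨wy, hwy⟩ := Option.isSome_iff_exists.mp hcy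
    rw [hwx, hwy] at hw
    simp only [Option.getD_some] at hw
    subst hw
    have hmx : (wx, x) ∈ mapping := pvInv_mem mapping x wx hwx
    have hmy : (wx, y) ∈ mapping := pvInv_mem mapping y wx hwy
    have h1 : (PySem.Dict.mk mapping).get? wx = some x :=
      PySem.Dict.get?_of_mem_items (PySem.Dict.mk mapping) hmx hndk
    have h2 : (PySem.Dict.mk mapping).get? wx = some y :=
      PySem.Dict.get?_of_mem_items (PySem.Dict.mk mapping) hmy hndk
    rw [h1] at h2
    exact (Option.some.injEq _ _).mp h2
  rw [pvOfList_map M _ hinjOn]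
  rw [List.count_eq_countP, List.countP_map, List.countP_eq_length_filter]
  have hperm : (PySem.Set.ofList M).Perm
      ((PySem.Set.ofList (mapping.map (·.2))).filter ((fun x => x == pvKey rv0) ∘ pvKey)) := by
    rw [List.perm_ext_iff_of_nodup (PySem.Set.nodup_ofList _)
      (List.Nodup.filter _ (PySem.Set.nodup_ofList _))]
    intro q
    simp only [hM, hI, PySem.Set.mem_ofList, List.mem_filter, Function.comp, beq_iff_eq]
    constructor
    · rintro ⟨hqI, hqc⟩
      exact ⟨(pvInv_contains mapping q).mp (by simpa using hqc), (pvOrbit_char rv0 q).mp hqI⟩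
    · rintro ⟨hqv, hkey⟩
      exact ⟨(pvOrbit_char rv0 q).mpr hkey, by simpa using (pvInv_contains mapping q).mpr hqv⟩
  simp only [PySem.Set.len, List.length_map, hperm.length_eq]
  omega

-- ===== VERDICT (by name: the statement is the Claim_ definition above) =====
theorem orbit_size_hist_py_spec : Claim_equal_orbit_size_hist_py := by
  intro words mapping _ hpre
  obtain ⟨hnd, _⟩ := hpre
  unfold Spec_orbit_size_hist_py
  simp only [orbit_size_hist_py, orbit_size_hist_py_alt]
  apply congrArg (fun its => PySem.List.sorted2 its (fun kv : Int × Int => kv.1) (fun kv : Int × Int => kv.2))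
  apply congrArg PySem.Dict.items
  apply PySem.List.foldl_congr_mem
  intro acc w0 _
  have h := pvPerWord mapping hnd (((PySem.Dict.mk mapping).get? w0).getD (0, 0, 0))
  rw [h]
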